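-- pv_equiv track=rewrite | github.com/JohnnyPro/JavaToAssembly | assembler.py | extract_for_components
-- ===== SOURCE A (Python) =====
-- def extract_for_components(components):
--     components = [c.strip() for c in components]
--     condition_start_idx = components.index(';') + 1
--     update_stmt_start_idx = components.index(';', condition_start_idx) + 1
--     init_stmt = components[:condition_start_idx - 1]
--     condition = components[condition_start_idx:update_stmt_start_idx - 1]
--     update_stmt = components[update_stmt_start_idx:]
--     return init_stmt, condition, update_stmt
-- ===== SOURCE B (Python) =====
-- def extract_for_components(components):
--     init_stmt, condition, update_stmt = [], [], []
--     buckets = (init_stmt, condition, update_stmt)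
--     k = 0
--     for c in components:
--         c = c.strip()
--         if c == ';' and k < 2:
--             k += 1
--         else:
--             buckets[k].append(c)
--     if k < 2:
--         raise ValueError("';' is not in list")
--     return buckets
-- ===== Notes on version B (the rewrite author's own statement) =====
-- stated objective: alternative
-- what changed: Replaces the two index() scans plus three slices by a single pass that appends each stripped element to the current of three buckets, advancing the bucket on the first two ';'.
import Mathlib
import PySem

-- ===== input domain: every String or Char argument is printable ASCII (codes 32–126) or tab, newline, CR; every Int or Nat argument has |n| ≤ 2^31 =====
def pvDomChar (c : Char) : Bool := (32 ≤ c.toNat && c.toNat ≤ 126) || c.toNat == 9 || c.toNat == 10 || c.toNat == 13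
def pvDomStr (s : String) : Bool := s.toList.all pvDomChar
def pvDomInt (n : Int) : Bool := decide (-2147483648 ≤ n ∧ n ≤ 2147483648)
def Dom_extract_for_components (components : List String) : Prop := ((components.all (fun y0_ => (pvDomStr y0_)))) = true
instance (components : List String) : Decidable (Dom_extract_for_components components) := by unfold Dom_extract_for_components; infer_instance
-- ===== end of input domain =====

-- B replaces the two index scans plus three slices by one pass that appends each stripped
-- element to the current of three buckets, advancing the bucket on the first two ';' (objective: alternative single-pass decomposition).

-- ===== PORT A =====
-- components.index(';', start) is hand-ported as 'start + index? (s.drop start) ";"'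
-- (exact: Python searches from position start and reports the absolute index).
def extract_for_components (components : List String) : List String × List String × List String :=
  let s := components.map (fun c => PySem.Str.strip c)
  match PySem.List.index? s ";" with
  | none => ([], [], [])               -- Python raises ValueError here; excluded by Pre_
  | some i0 =>
    let ci : Nat := i0 + 1             -- condition_start_idx
    match PySem.List.index? (s.drop ci) ";" with
    | none => ([], [], [])             -- Python raises ValueError here; excluded by Pre_
    | some j0 =>
      let ui : Nat := ci + j0 + 1      -- update_stmt_start_idx
      (PySem.List.slice s none (some ((ci : Int) - 1)),
       PySem.List.slice s (some (ci : Int)) (some ((ui : Int) - 1)),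
       PySem.List.slice s (some (ui : Int)) none)

-- ===== PORT B =====
def pvBStep (st : List String × List String × List String × Nat) (c : String) :
    List String × List String × List String × Nat :=
  let c := PySem.Str.strip c
  match st with
  | (b0, b1, b2, k) =>
    if c = ";" ∧ k < 2 then (b0, b1, b2, k + 1)
    else match k with
      | 0 => (b0 ++ [c], b1, b2, 0)
      | 1 => (b0, b1 ++ [c], b2, 1)
      | _ => (b0, b1, b2 ++ [c], k)

def extract_for_components_alt (components : List String) : List String × List String × List String :=
  let st := components.foldl pvBStep ([], [], [], 0)
  -- Python B raises ValueError when fewer than two ';' were seen; excluded by Pre_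
  (st.1, st.2.1, st.2.2.1)

-- ===== PRECONDITION & SPEC =====
-- Pre_: the stripped list contains at least two ';' — exactly where both Pythons return (else ValueError).
def Pre_extract_for_components (components : List String) : Prop :=
  2 ≤ (components.map (fun c => PySem.Str.strip c)).count ";"
instance (components : List String) : Decidable (Pre_extract_for_components components) := by
  unfold Pre_extract_for_components; infer_instance
def pvWitness_extract_for_components : List String := ["i = 0", ";", "i < n", ";", "i = i + 1"]

def Spec_extract_for_components (components : List String) (out : List String × List String × List String) : Prop := out = extract_for_components_alt components
instance (components : List String) (out : List String × List String × List String) : Decidable (Spec_extract_for_components components out) := by unfold Spec_extract_for_components; infer_instance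

-- ===== CLAIM (what is proved, stated in full; the proofs are below) =====
def Claim_equal_extract_for_components : Prop := ∀ (components : List String), Dom_extract_for_components components → Pre_extract_for_components components → Spec_extract_for_components components (extract_for_components components)

-- ===== LEMMAS AND PROOFS =====

-- step on an already-stripped element (strip is idempotent is NOT needed: we fold over the raw
-- list via foldl_map below, so define the non-stripping step the fold over s uses)
def pvStep (st : List String × List String × List String × Nat) (c : String) :
    List String × List String × List String × Nat :=
  match st with
  | (b0, b1, b2, k) =>
    if c = ";" ∧ k < 2 then (b0, b1, b2, k + 1)
    else match k with
      | 0 => (b0 ++ [c], b1, b2, 0)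
      | 1 => (b0, b1 ++ [c], b2, 1)
      | _ => (b0, b1, b2 ++ [c], k)

lemma pvPhase2 (t : List String) (b0 b1 b2 : List String) :
    t.foldl pvStep (b0, b1, b2, 2) = (b0, b1, b2 ++ t, 2) := by
  induction t generalizing b2 with
  | nil => simp
  | cons c t ih =>
    simp only [List.foldl_cons, pvStep]
    rw [if_neg (by omega)]
    simpa using ih (b2 ++ [c])

lemma pvPhase1 (t : List String) (b0 b1 : List String) (j : Nat)
    (h : PySem.List.index? t ";" = some j) :
    t.foldl pvStep (b0, b1, [], 1) = (b0, b1 ++ t.take j, t.drop (j + 1), 2) := by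
  induction t generalizing b1 j with
  | nil => simp [PySem.List.index?] at h
  | cons c t ih =>
    by_cases hc : c = ";"
    · subst hc
      rw [PySem.List.index?_cons_self] at h
      cases h
      simp only [List.foldl_cons, pvStep]
      simpa using pvPhase2 t b0 b1 []
    · rw [PySem.List.index?_cons_of_ne t hc] at h
      cases hj : PySem.List.index? t ";" with
      | none => rw [hj] at h; simp at h
      | some j' =>
        rw [hj] at h; simp at h
        subst h
        simp only [List.foldl_cons, pvStep]
        rw [if_neg (by intro ⟨h1, _⟩; exact hc h1)]
        rw [ih (b1 ++ [c]) j' hj]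
        simp [List.take_succ_cons, List.drop_succ_cons]
  
lemma pvPhase0 (t : List String) (b0 : List String) (i j : Nat)
    (hi : PySem.List.index? t ";" = some i)
    (hj : PySem.List.index? (t.drop (i + 1)) ";" = some j) :
    t.foldl pvStep (b0, [], [], 0) =
      (b0 ++ t.take i, (t.drop (i + 1)).take j, (t.drop (i + 1)).drop (j + 1), 2) := by
  induction t generalizing b0 i with
  | nil => simp [PySem.List.index?] at hi
  | cons c t ih =>
    by_cases hc : c = ";"
    · subst hc
      rw [PySem.List.index?_cons_self] at hi
      cases hi
      simp only [List.drop_succ_cons, List.drop_zero] at hj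
      simp only [List.foldl_cons, pvStep]
      simpa using pvPhase1 t b0 [] j hj
    · rw [PySem.List.index?_cons_of_ne t hc] at hi
      cases hi' : PySem.List.index? t ";" with
      | none => rw [hi'] at hi; simp at hi
      | some i' =>
        rw [hi'] at hi; simp at hi
        subst hi
        simp only [List.drop_succ_cons] at hj
        simp only [List.foldl_cons, pvStep]
        rw [if_neg (by intro ⟨h1, _⟩; exact hc h1)]
        rw [ih (b0 ++ [c]) i' hi' hj]
        simp [List.take_succ_cons]

lemma pvCount_mem {s : List String} (h : 2 ≤ s.count ";") : ";" ∈ s :=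
  List.count_pos_iff.mp (by omega)

lemma pvSecond_mem {s : List String} {i : Nat} (h : 2 ≤ s.count ";")
    (hi : PySem.List.index? s ";" = some i) : ";" ∈ s.drop (i + 1) := by
  obtain ⟨pre, suf, hs, hlen, hnot⟩ := (PySem.List.index?_eq_some_iff s ";" i).mp hi
  subst hs
  have hcp : pre.count ";" = 0 := List.count_eq_zero.mpr hnot
  have hcount : (pre ++ ";" :: suf).count ";" = pre.count ";" + (1 + suf.count ";") := by
    simp [List.count_append]
    omega
  have hsuf : 1 ≤ suf.count ";" := by rw [hcount, hcp] at h; omega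
  have hsplit : pre ++ ";" :: suf = (pre ++ [";"]) ++ suf := by simp
  have hdrop : (pre ++ ";" :: suf).drop (i + 1) = suf := by
    rw [hsplit, List.drop_left' (by simp [hlen])]
  rw [hdrop]
  exact List.count_pos_iff.mp (by omega)

-- ===== VERDICT (by name: the statement is the Claim_ definition above) =====
theorem extract_for_components_spec : Claim_equal_extract_for_components := by
  intro components _ hpre
  have hpre' : 2 ≤ ((components.map (fun c => PySem.Str.strip c)).count ";") := hpre
  obtain ⟨i0, hi⟩ := Option.isSome_iff_exists.mp
    ((PySem.List.index?_isSome_iff (components.map (fun c => PySem.Str.strip c)) ";").mpr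
      (pvCount_mem hpre'))
  obtain ⟨j0, hj⟩ := Option.isSome_iff_exists.mp
    ((PySem.List.index?_isSome_iff
        ((components.map (fun c => PySem.Str.strip c)).drop (i0 + 1)) ";").mpr
      (pvSecond_mem hpre' hi))
  have hfold : components.foldl pvBStep ([], [], [], 0)
      = (components.map (fun c => PySem.Str.strip c)).foldl pvStep ([], [], [], 0) := by
    rw [List.foldl_map]
    congr 1
  unfold Spec_extract_for_components extract_for_components extract_for_components_alt
  simp only [hi, hj, hfold,
    pvPhase0 (components.map (fun c => PySem.Str.strip c)) [] i0 j0 hi hj]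
  have e1 : ((i0 + 1 : Nat) : Int) - 1 = ((i0 : Nat) : Int) := by push_cast; ring
  have e2 : ((i0 + 1 + j0 + 1 : Nat) : Int) - 1 = ((i0 + 1 + j0 : Nat) : Int) := by
    push_cast; ring
  rw [e1, e2, PySem.List.slice_to_natCast, PySem.List.slice_natCast,
    PySem.List.slice_from_natCast]
  simp [List.drop_drop]
  omega
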